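-- pv_equiv track=rewrite | github.com/Fondamenti18/fondamenti-di-programmazione | students/1807996/homework03/program03.py | sali
-- ===== SOURCE A (Python) =====
-- def height(img):
--     return len(img)
--
-- def sali(img,i,x):
--     ni=i
--     nl=[]
--     nl2=[]
--     for ni in range(i,height(img)):
--         if img[ni][x]==img[i][x]:
--             coo=(ni,x)
--             nl.append(coo)
--             if ni==len(img)-1:
--                 nl2.append(coo)
--                 break
--             if img[ni+1][x]!=img[i][x]:
--                 nl2.append(coo)
--                 break
--     return nl,nl2
-- ===== SOURCE B (Python) =====
-- def sali(img, i, x):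
--     n = len(img)
--     if i >= n:
--         return [], []
--     v = img[i][x]
--     j = next((r for r in range(i + 1, n) if img[r][x] != v), n)
--     nl = [(r, x) for r in range(i, j)]
--     return nl, [nl[-1]]
-- ===== Notes on version B (the rewrite author's own statement) =====
-- stated objective: simpler
-- what changed: Instead of A's single accumulate-with-break loop (appending to nl inside the scan and to nl2 at two internal break points with a look-ahead test), B first locates the run boundary j as the first mismatching row index via next() over a generator, then constructs nl in one closed-form comprehension over range(i, j) and nl2 as [nl[-1]].
import Mathlib
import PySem

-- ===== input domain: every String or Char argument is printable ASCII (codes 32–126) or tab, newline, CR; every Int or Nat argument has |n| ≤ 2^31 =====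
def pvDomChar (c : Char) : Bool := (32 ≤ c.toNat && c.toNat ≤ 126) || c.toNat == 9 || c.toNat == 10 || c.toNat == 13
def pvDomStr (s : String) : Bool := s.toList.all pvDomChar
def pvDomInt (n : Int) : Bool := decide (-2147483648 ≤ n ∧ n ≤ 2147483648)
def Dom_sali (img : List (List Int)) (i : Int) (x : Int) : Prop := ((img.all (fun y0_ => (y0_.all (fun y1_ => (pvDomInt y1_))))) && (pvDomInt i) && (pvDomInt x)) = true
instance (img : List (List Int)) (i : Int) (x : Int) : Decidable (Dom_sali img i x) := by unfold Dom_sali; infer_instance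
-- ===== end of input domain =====

-- B replaces A's accumulate-with-break scan by: find the run boundary j, then build the
-- result lists from j by closed-form range construction (objective: simpler).

-- img[r][c] as an Option (none = the access Python would raise IndexError on; Pre_ excludes those)
def pvGet2 (img : List (List Int)) (r c : Int) : Option Int :=
  (PySem.List.pyGet? img r).bind (fun row => PySem.List.pyGet? row c)

-- ===== PORT A =====
-- the for-loop of A over range(i, height(img)) with its two breaks
def saliA_loop (img : List (List Int)) (i x : Int) :
    List Int → List (Int × Int) → List (Int × Int) → (List (Int × Int)) × (List (Int × Int))
  | [], nl, nl2 => (nl, nl2)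
  | ni :: rest, nl, nl2 =>
    if pvGet2 img ni x = pvGet2 img i x then
      let coo := (ni, x)
      let nl' := nl ++ [coo]
      if ni = (img.length : Int) - 1 then (nl', nl2 ++ [coo])
      else if pvGet2 img (ni + 1) x ≠ pvGet2 img i x then (nl', nl2 ++ [coo])
      else saliA_loop img i x rest nl' nl2
    else saliA_loop img i x rest nl nl2

def sali (img : List (List Int)) (i : Int) (x : Int) : (List (Int × Int)) × (List (Int × Int)) :=
  saliA_loop img i x (PySem.List.pyRange i (img.length : Int) 1) [] []

-- ===== PORT B =====
-- j = next((r for r in range(i+1, n) if img[r][x] != v), n); nl = [(r,x) for r in range(i,j)]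
def sali_alt (img : List (List Int)) (i : Int) (x : Int) : (List (Int × Int)) × (List (Int × Int)) :=
  let n : Int := (img.length : Int)
  if i ≥ n then ([], []) else
    let v := pvGet2 img i x
    let j := ((PySem.List.pyRange (i + 1) n 1).find? (fun r => decide (pvGet2 img r x ≠ v))).getD n
    let nl := (PySem.List.pyRange i j 1).map (fun r => (r, x))
    (nl, match PySem.List.pyGet? nl (-1) with | some c => [c] | none => [])

-- ===== PRECONDITION & SPEC =====
-- Pre_ excludes EXACTLY the inputs on which Python A raises IndexError: i below -len(img)
-- with a nonempty scan, x invalid for row i, or x invalid for the row just past a prefix of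
-- rows i..r whose column-x values all equal img[i][x] (the look-ahead A actually performs).
def Pre_sali (img : List (List Int)) (i : Int) (x : Int) : Prop :=
  ((img.length : Int) ≤ i) ∨
    (-(img.length : Int) ≤ i ∧ (pvGet2 img i x).isSome ∧
      ∀ r ∈ PySem.List.pyRange i ((img.length : Int) - 1) 1,
        (∀ s ∈ PySem.List.pyRange i (r + 1) 1, pvGet2 img s x = pvGet2 img i x) →
          (pvGet2 img (r + 1) x).isSome)
instance (img : List (List Int)) (i : Int) (x : Int) : Decidable (Pre_sali img i x) := by
  unfold Pre_sali; infer_instance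

def pvWitness_sali : List (List Int) × Int × Int := ([[1], [1], [2]], 0, 0)

def Spec_sali (img : List (List Int)) (i : Int) (x : Int) (out : (List (Int × Int)) × (List (Int × Int))) : Prop := out = sali_alt img i x
instance (img : List (List Int)) (i : Int) (x : Int) (out : (List (Int × Int)) × (List (Int × Int))) : Decidable (Spec_sali img i x out) := by unfold Spec_sali; infer_instance

-- ===== CLAIM =====
def Claim_equal_sali : Prop := ∀ (img : List (List Int)) (i : Int) (x : Int), Dom_sali img i x → Pre_sali img i x → Spec_sali img i x (sali img i x)

-- ===== LEMMAS AND PROOFS =====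

-- proof-only intermediate: the run as a while-style recursion, used to bridge A's loop and B's range
def saliB_loop (img : List (List Int)) (i x ni : Int) (nl : List (Int × Int)) : List (Int × Int) :=
  if _h : ni < (img.length : Int) then
    if pvGet2 img ni x = pvGet2 img i x then
      saliB_loop img i x (ni + 1) (nl ++ [(ni, x)])
    else nl
  else nl
termination_by ((img.length : Int) - ni).toNat
decreasing_by omega

def pvLastRun (nl : List (Int × Int)) : List (Int × Int) :=
  match nl.getLast? with
  | some c => [c]
  | none => []

-- B's boundary, generalized to start at any index
def pvBound (img : List (List Int)) (i x ni : Int) : Int :=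
  ((PySem.List.pyRange ni (img.length : Int) 1).find?
      (fun r => decide (pvGet2 img r x ≠ pvGet2 img i x))).getD (img.length : Int)

-- accumulator lemma for the while loop
lemma saliB_acc : ∀ (n : Nat) (img : List (List Int)) (i x ni : Int) (nl : List (Int × Int)),
    ((img.length : Int) - ni).toNat ≤ n →
    saliB_loop img i x ni nl = nl ++ saliB_loop img i x ni [] := by
  intro n
  induction n with
  | zero =>
    intro img i x ni nl h
    have hni : ¬ ni < (img.length : Int) := by omega
    conv_lhs => rw [saliB_loop]
    conv_rhs => rw [saliB_loop]
    simp [hni]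
  | succ k ih =>
    intro img i x ni nl _
    by_cases hni : ni < (img.length : Int)
    · by_cases hc : pvGet2 img ni x = pvGet2 img i x
      · conv_lhs => rw [saliB_loop]
        conv_rhs => rw [saliB_loop]
        simp only [hni, hc, dif_pos, if_pos]
        rw [ih img i x (ni + 1) (nl ++ [(ni, x)]) (by omega),
            ih img i x (ni + 1) ([] ++ [(ni, x)]) (by omega)]
        simp
      · conv_lhs => rw [saliB_loop]
        conv_rhs => rw [saliB_loop]
        simp [hni, hc]
    · conv_lhs => rw [saliB_loop]
      conv_rhs => rw [saliB_loop]
      simp [hni]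

lemma saliB_ne_nil (img : List (List Int)) (i x ni : Int)
    (hni : ni < (img.length : Int)) (hc : pvGet2 img ni x = pvGet2 img i x) :
    saliB_loop img i x ni [] ≠ [] := by
  rw [saliB_loop]
  simp only [hni, hc, dif_pos, if_pos, List.nil_append]
  rw [saliB_acc (((img.length : Int) - (ni + 1)).toNat) img i x (ni + 1) [(ni, x)] (le_refl _)]
  simp

lemma pvLastRun_append (a : List (Int × Int)) {b : List (Int × Int)} (hb : b ≠ []) :
    pvLastRun (a ++ b) = pvLastRun b := by
  rcases b.eq_nil_or_concat with rfl | ⟨bs, c, rfl⟩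
  · exact absurd rfl hb
  · unfold pvLastRun
    rw [List.concat_eq_append, ← List.append_assoc, List.getLast?_concat, List.getLast?_concat]

-- A's loop from ni equals the while-style run from ni (with the break invariant)
lemma sali_key : ∀ (n : Nat) (img : List (List Int)) (i x ni : Int) (nl : List (Int × Int)),
    ((img.length : Int) - ni).toNat ≤ n →
    ((img.length : Int) ≤ ni ∨ pvGet2 img ni x = pvGet2 img i x) →
    saliA_loop img i x (PySem.List.pyRange ni (img.length : Int) 1) nl [] =
      (nl ++ saliB_loop img i x ni [], pvLastRun (saliB_loop img i x ni [])) := by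
  intro n
  induction n with
  | zero =>
    intro img i x ni nl h _
    have hni : ¬ ni < (img.length : Int) := by omega
    rw [PySem.List.pyRange_one_eq_nil (by omega), saliA_loop, saliB_loop]
    simp [hni, pvLastRun]
  | succ k ih =>
    intro img i x ni nl h hinv
    by_cases hni : ni < (img.length : Int)
    · have hc : pvGet2 img ni x = pvGet2 img i x := by
        rcases hinv with h1 | h2
        · omega
        · exact h2
      rw [PySem.List.pyRange_one_cons hni, saliA_loop]
      simp only [hc, if_pos]
      have hB : saliB_loop img i x ni [] = [(ni, x)] ++ saliB_loop img i x (ni + 1) [] := by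
        rw [saliB_loop]
        simp only [hni, hc, dif_pos, if_pos, List.nil_append]
        exact saliB_acc (((img.length : Int) - (ni + 1)).toNat) img i x (ni + 1) [(ni, x)] (le_refl _)
      by_cases hlast : ni = (img.length : Int) - 1
      · have hstop : saliB_loop img i x (ni + 1) [] = [] := by
          rw [saliB_loop]; simp [show ¬ ni + 1 < (img.length : Int) by omega]
        rw [if_pos hlast, hB, hstop]
        simp [pvLastRun]
      · rw [if_neg hlast]
        by_cases hla : pvGet2 img (ni + 1) x = pvGet2 img i x
        · have hni1 : ni + 1 < (img.length : Int) := by omega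
          rw [if_neg (by simpa using hla)]
          rw [ih img i x (ni + 1) (nl ++ [(ni, x)]) (by omega) (Or.inr hla), hB]
          have hne := saliB_ne_nil img i x (ni + 1) hni1 hla
          rw [pvLastRun_append [(ni, x)] hne]
          simp
        · have hstop : saliB_loop img i x (ni + 1) [] = [] := by
            by_cases hni1 : ni + 1 < (img.length : Int)
            · rw [saliB_loop]; simp [hni1, hla]
            · rw [saliB_loop]; simp [hni1]
          rw [if_pos hla, hB, hstop]
          simp [pvLastRun]
    · have hni' : (img.length : Int) ≤ ni := by omega
      rw [PySem.List.pyRange_one_eq_nil hni', saliA_loop, saliB_loop]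
      simp [show ¬ ni < (img.length : Int) from hni, pvLastRun]

-- the boundary never precedes its start (when the start is in range of the list)
lemma pvBound_ge : ∀ (n : Nat) (img : List (List Int)) (i x ni : Int),
    ((img.length : Int) - ni).toNat ≤ n → ni ≤ (img.length : Int) →
    ni ≤ pvBound img i x ni := by
  intro n
  induction n with
  | zero =>
    intro img i x ni h hle
    have : (img.length : Int) ≤ ni := by omega
    unfold pvBound
    rw [PySem.List.pyRange_one_eq_nil this]
    simpa using hle
  | succ k ih =>
    intro img i x ni h hle
    by_cases hni : ni < (img.length : Int)
    · unfold pvBound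
      rw [PySem.List.pyRange_one_cons hni, List.find?_cons]
      by_cases hc : pvGet2 img ni x = pvGet2 img i x
      · simp only [hc, decide_not, ne_eq, not_true_eq_false, decide_false]
        have := ih img i x (ni + 1) (by omega) (by omega)
        unfold pvBound at this
        simp only [decide_not] at this ⊢
        omega
      · simp [hc]
    · unfold pvBound
      rw [PySem.List.pyRange_one_eq_nil (by omega)]
      simpa using hle
  
lemma pvBound_stop (img : List (List Int)) (i x ni : Int) (h : (img.length : Int) ≤ ni) :
    pvBound img i x ni = (img.length : Int) := by
  unfold pvBound
  rw [PySem.List.pyRange_one_eq_nil h]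
  simp

-- the while run from ni is exactly the coordinate range up to the boundary
lemma loop_eq_range : ∀ (n : Nat) (img : List (List Int)) (i x ni : Int),
    ((img.length : Int) - ni).toNat ≤ n →
    saliB_loop img i x ni [] =
      (PySem.List.pyRange ni (pvBound img i x ni) 1).map (fun r => (r, x)) := by
  intro n
  induction n with
  | zero =>
    intro img i x ni h
    have hni : ¬ ni < (img.length : Int) := by omega
    rw [saliB_loop, pvBound_stop img i x ni (by omega),
        PySem.List.pyRange_one_eq_nil (by omega)]
    simp [hni]
  | succ k ih =>
    intro img i x ni h
    by_cases hni : ni < (img.length : Int)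
    · by_cases hc : pvGet2 img ni x = pvGet2 img i x
      · have hstep : saliB_loop img i x ni [] = [(ni, x)] ++ saliB_loop img i x (ni + 1) [] := by
          rw [saliB_loop]
          simp only [hni, hc, dif_pos, if_pos, List.nil_append]
          exact saliB_acc (((img.length : Int) - (ni + 1)).toNat) img i x (ni + 1) [(ni, x)] (le_refl _)
        have hbound : pvBound img i x ni = pvBound img i x (ni + 1) := by
          unfold pvBound
          rw [PySem.List.pyRange_one_cons hni, List.find?_cons]
          simp [hc]
        have hge : ni + 1 ≤ pvBound img i x (ni + 1) :=
          pvBound_ge (((img.length : Int) - (ni + 1)).toNat) img i x (ni + 1) (le_refl _) (by omega)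
        rw [hstep, hbound, ih img i x (ni + 1) (by omega),
            PySem.List.pyRange_one_cons (show ni < pvBound img i x (ni + 1) by omega)]
        simp
      · have hbound : pvBound img i x ni = ni := by
          unfold pvBound
          rw [PySem.List.pyRange_one_cons hni, List.find?_cons]
          simp [hc]
        rw [saliB_loop, hbound]
        rw [PySem.List.pyRange_one_eq_nil (le_refl ni)]
        simp [hni, hc]
    · rw [saliB_loop, pvBound_stop img i x ni (by omega),
          PySem.List.pyRange_one_eq_nil (by omega)]
      simp [hni]

-- [nl[-1]] if any, as the match in sali_alt computes it, equals pvLastRun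
lemma match_neg_one_eq_lastRun (nl : List (Int × Int)) :
    (match PySem.List.pyGet? nl (-1) with | some c => [c] | none => []) = pvLastRun nl := by
  rw [PySem.List.pyGet?_neg_one]
  unfold pvLastRun
  rfl

-- ===== VERDICT =====
theorem sali_spec : Claim_equal_sali := by
  intro img i x _ _
  unfold Spec_sali sali sali_alt
  rw [sali_key (((img.length : Int) - i).toNat) img i x i [] (le_refl _) (Or.inr rfl)]
  by_cases hi : i ≥ (img.length : Int)
  · have hstop : saliB_loop img i x i [] = [] := by
      rw [saliB_loop]; simp [show ¬ i < (img.length : Int) by omega]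
    simp only [hi, if_pos]
    rw [hstop]
    simp [pvLastRun]
  · have hni : i < (img.length : Int) := by omega
    simp only [hi, if_false]
    rw [match_neg_one_eq_lastRun]
    -- identify B's j with pvBound from i+1, and peel the first step of the while run
    have hstep : saliB_loop img i x i [] = [(i, x)] ++ saliB_loop img i x (i + 1) [] := by
      rw [saliB_loop]
      simp only [hni, dif_pos, if_pos, List.nil_append]
      exact saliB_acc (((img.length : Int) - (i + 1)).toNat) img i x (i + 1) [(i, x)] (le_refl _)
    have hge : i + 1 ≤ pvBound img i x (i + 1) :=
      pvBound_ge (((img.length : Int) - (i + 1)).toNat) img i x (i + 1) (le_refl _) (by omega)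
    have hrun : saliB_loop img i x i [] =
        (PySem.List.pyRange i (pvBound img i x (i + 1)) 1).map (fun r => (r, x)) := by
      rw [hstep, loop_eq_range (((img.length : Int) - (i + 1)).toNat) img i x (i + 1) (le_refl _),
          PySem.List.pyRange_one_cons (show i < pvBound img i x (i + 1) by omega)]
      simp
    rw [hrun]
    rfl
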